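-- pv_equiv track=rewrite | github.com/Komdix/bekap_wins | bakap_nadruhu/kodikovanie/old/1st_block/02/p2_joined.py | joined
-- ===== SOURCE A (Python) =====
-- def get_digit(number, k):
--     return (number // 10 ** k) % 10
--
-- def get_count(start, count):
--     counter = -1
--     for i in range(0, count):
--         n = start + i
--         while n > 0:
--             n //= 2
--             counter += 1
--     return counter
--
-- def joined(start, count):
--     order_of_digit = get_count(start, count)
--     n = 0
--     Binary_form = 0
--     final = 0
--     for i in range(0, count):
--         n = start + i
--         Binary_form = 0
--         rest = start + i
--         count_1 = 0
--         while n > 0: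
--             n //= 2
--             count_1 += 1
--         n = start + i
--         for j in range(count_1):
--             rest = n % 2
--             n //= 2
--             Binary_form += rest * (10 ** j)
--         for j in range(count_1, 0, -1):
--             dig = get_digit(Binary_form, j-1)
--             if dig == 1:
--                 final += 2 ** order_of_digit
--             order_of_digit -= 1
--     return final
-- ===== SOURCE B (Python) =====
-- def joined(start, count):
--     # Single accumulator pass: shift the accumulator left by each value's bit
--     # length and add the value, instead of A's decimal encode/decode machinery.
--     acc = 0
--     for i in range(count):
--         v = start + i
--         if v > 0:
--             acc = acc * 2 ** v.bit_length() + v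
--     return acc
-- ===== Notes on version B (the rewrite author's own statement) =====
-- stated objective: simpler
-- what changed: Replaces A's precomputed global bit index plus per-value decimal encode (bits as base-10 digits) and decode (get_digit per bit) with a single fold that shifts the accumulator by each value's bit length and adds the value.
import Mathlib
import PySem

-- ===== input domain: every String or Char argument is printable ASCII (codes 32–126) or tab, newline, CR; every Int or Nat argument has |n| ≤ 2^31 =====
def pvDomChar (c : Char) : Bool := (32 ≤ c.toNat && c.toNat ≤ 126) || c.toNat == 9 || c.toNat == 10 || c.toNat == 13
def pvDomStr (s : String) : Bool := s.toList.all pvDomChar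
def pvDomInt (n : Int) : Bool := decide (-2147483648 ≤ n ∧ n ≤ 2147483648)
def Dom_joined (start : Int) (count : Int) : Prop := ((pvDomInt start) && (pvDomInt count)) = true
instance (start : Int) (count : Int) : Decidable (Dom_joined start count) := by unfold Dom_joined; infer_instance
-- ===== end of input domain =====

-- B replaces A's global-bit-index bookkeeping and per-value decimal encode/decode
-- with one shift-and-add fold; simpler, same single pass over the range.

-- ===== PORT A =====

-- (number // 10 ** k) % 10 ; k ≥ 0 at every call site (k = j-1 with j ≥ 1), where 10 ** k = 10 ^ k.toNat
def get_digit (number : Int) (k : Int) : Int :=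
  PySem.Int.mod (PySem.Int.floordiv number (10 ^ k.toNat)) 10

-- the 'while n > 0: n //= 2; counter += 1' loop (used by get_count and for count_1)
def halveCount (n : Int) (c : Int) : Int :=
  if h : 0 < n then halveCount (PySem.Int.floordiv n 2) (c + 1) else c
termination_by n.toNat
decreasing_by
  rw [PySem.Int.floordiv_eq_ediv_of_pos (by omega)]
  omega

def get_count (start : Int) (count : Int) : Int :=
  (PySem.List.pyRange 0 count 1).foldl (fun counter i => halveCount (start + i) counter) (-1)

def joined (start : Int) (count : Int) : Int :=
  let order₀ := get_count start count
  ((PySem.List.pyRange 0 count 1).foldl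
    (fun (st : Int × Int) i =>
      let n₀ := start + i
      let count1 := halveCount n₀ 0
      -- for j in range(count_1): rest = n % 2; n //= 2; Binary_form += rest * 10 ** j
      let enc := (PySem.List.pyRange 0 count1 1).foldl
          (fun (p : Int × Int) j =>
            (PySem.Int.floordiv p.1 2, p.2 + PySem.Int.mod p.1 2 * 10 ^ j.toNat)) (n₀, 0)
      -- for j in range(count_1, 0, -1): ... ; 2 ** order_of_digit ported as 2 ^ toNat (the
      -- branch only ever fires with a nonnegative order_of_digit, as the proof below shows)
      (PySem.List.pyRange count1 0 (-1)).foldl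
          (fun (q : Int × Int) j =>
            if get_digit enc.2 (j - 1) == 1 then (q.1 - 1, q.2 + 2 ^ q.1.toNat)
            else (q.1 - 1, q.2)) st)
    (order₀, 0)).2

-- ===== PORT B =====
def joined_alt (start : Int) (count : Int) : Int :=
  (PySem.List.pyRange 0 count 1).foldl
    (fun acc i =>
      let v := start + i
      if 0 < v then acc * 2 ^ PySem.Int.bitLength v + v else acc) 0

-- ===== PRECONDITION & SPEC =====
def Spec_joined (start : Int) (count : Int) (out : Int) : Prop := out = joined_alt start count
instance (start : Int) (count : Int) (out : Int) : Decidable (Spec_joined start count out) := by unfold Spec_joined; infer_instance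

-- ===== CLAIM (what is proved, stated in full; the proofs are below) =====
def Claim_equal_joined : Prop := ∀ (start : Int) (count : Int), Dom_joined start count → Spec_joined start count (joined start count)

-- ===== LEMMAS AND PROOFS =====

-- bit length of a value as A's while-loop counts it (0 for non-positive values)
def blen (v : Int) : Nat := if 0 < v then PySem.Int.bitLength v else 0

-- total bit count of the values start+i for i in L
def bsum (start : Int) (L : List Int) : Nat := (L.map (fun i => blen (start + i))).sum

-- Binary_form as a number: the bits of v written as decimal digits
def decVal (v : Int) (c : Nat) : Nat := ∑ j ∈ Finset.range c, (v.toNat / 2 ^ j % 2) * 10 ^ j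

lemma blen_of_nonneg (m : Int) (hm : 0 ≤ m) : (blen m : Nat) = PySem.Int.bitLength m := by
  unfold blen
  rcases lt_or_eq_of_le hm with h | h
  · simp [h]
  · simp [← h, PySem.Int.bitLength_zero]

lemma halveCount_eq (n c : Int) : halveCount n c = c + (blen n : Int) := by
  induction n, c using halveCount.induct with
  | case1 n c h ih =>
    rw [halveCount, dif_pos h, ih]
    have hfd : (0:Int) ≤ PySem.Int.floordiv n 2 := by
      rw [PySem.Int.floordiv_eq_ediv_of_pos (by omega)]; omega
    rw [blen_of_nonneg _ hfd]
    have : blen n = PySem.Int.bitLength (PySem.Int.floordiv n 2) + 1 := by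
      unfold blen; rw [if_pos h, PySem.Int.bitLength_of_pos h]
    rw [this]; push_cast; ring
  | case2 n c h =>
    rw [halveCount, dif_neg h]
    simp [blen, h]

lemma get_count_eq (start : Int) (L : List Int) (c : Int) :
    L.foldl (fun counter i => halveCount (start + i) counter) c = c + (bsum start L : Int) := by
  induction L generalizing c with
  | nil => simp [bsum]
  | cons x t ih =>
    rw [List.foldl_cons, ih, halveCount_eq]
    unfold bsum
    push_cast
    simp [List.map_cons]
    ring

-- the encoding loop: n ends at v // 2^c, Binary_form at decVal v c
lemma enc_eq (v : Int) (hv : 0 ≤ v) (c : Nat) :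
    (PySem.List.pyRange 0 (c : Int) 1).foldl
      (fun (p : Int × Int) j =>
        (PySem.Int.floordiv p.1 2, p.2 + PySem.Int.mod p.1 2 * 10 ^ j.toNat)) (v, 0)
    = (((v.toNat / 2 ^ c : Nat) : Int), ((decVal v c : Nat) : Int)) := by
  induction c with
  | zero =>
    rw [PySem.List.pyRange_one_eq_nil (by omega)]
    simp [decVal, Int.toNat_of_nonneg hv]
  | succ c ih =>
    rw [Nat.cast_add, Nat.cast_one]
    rw [PySem.List.pyRange_one_succ_right (by omega), List.foldl_append, ih]
    simp only [List.foldl_cons, List.foldl_nil]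
    refine Prod.ext ?_ ?_
    · rw [PySem.Int.floordiv_eq_ediv_of_pos (by omega)]
      norm_cast
      rw [Nat.div_div_eq_div_mul, ← pow_succ]
    · rw [Int.toNat_natCast]
      have : PySem.Int.mod ((v.toNat / 2 ^ c : Nat) : Int) 2 = ((v.toNat / 2 ^ c % 2 : Nat) : Int) := by
        exact_mod_cast PySem.Int.mod_natCast (v.toNat / 2 ^ c) 2
      rw [this]
      unfold decVal
      rw [Finset.sum_range_succ]
      push_cast
      ring

lemma binval (m : Nat) (c : Nat) :
    (∑ j ∈ Finset.range c, (m / 2 ^ j % 2) * 2 ^ j) = m % 2 ^ c := by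
  induction c with
  | zero => simp [Nat.mod_one]
  | succ c ih =>
    rw [Finset.sum_range_succ, ih, pow_succ, Nat.mod_mul]
    ring

lemma dec_split (c : Nat) (d : Nat → Nat) :
    (∑ j ∈ Finset.range (c+1), d j * 10 ^ j)
      = 10 * (∑ j ∈ Finset.range c, d (j+1) * 10 ^ j) + d 0 := by
  rw [Finset.sum_range_succ' (fun j => d j * 10 ^ j) c, Finset.mul_sum]
  congr 1
  · apply Finset.sum_congr rfl
    intro j _
    ring
  · simp

-- extracting decimal digit k from a sum of decimal digits
lemma digit_sum (k : Nat) : ∀ (c : Nat) (d : Nat → Nat), (∀ j, d j ≤ 9) → k < c →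
    ((∑ j ∈ Finset.range c, d j * 10 ^ j) / 10 ^ k) % 10 = d k := by
  induction k with
  | zero =>
    intro c d hd hk
    cases c with
    | zero => omega
    | succ c =>
      rw [dec_split, pow_zero, Nat.div_one, Nat.mul_add_mod]
      exact Nat.mod_eq_of_lt (by have := hd 0; omega)
  | succ k ih =>
    intro c d hd hk
    cases c with
    | zero => omega
    | succ c =>
      rw [dec_split, pow_succ', ← Nat.div_div_eq_div_mul, Nat.mul_add_div (by norm_num),
        (show d 0 / 10 = 0 from Nat.div_eq_of_lt (by have := hd 0; omega)), Nat.add_zero]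
      exact ih c (fun j => d (j+1)) (fun j => hd (j+1)) (by omega)

-- get_digit applied to Binary_form reads off bit k of v
lemma get_digit_dec (v : Int) (c : Nat) (k : Nat) (hk : k < c) :
    get_digit ((decVal v c : Nat) : Int) (k : Int) = ((v.toNat / 2 ^ k % 2 : Nat) : Int) := by
  unfold get_digit
  rw [Int.toNat_natCast]
  have h10 : ((10:Int) ^ k) = (((10 ^ k : Nat)) : Int) := by push_cast; ring
  rw [h10]
  rw [PySem.Int.floordiv_natCast]
  have hm : PySem.Int.mod (((decVal v c / 10 ^ k : Nat)) : Int) 10 = ((decVal v c / 10 ^ k % 10 : Nat) : Int) := by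
    exact_mod_cast PySem.Int.mod_natCast (decVal v c / 10 ^ k) 10
  rw [hm]
  norm_cast
  exact digit_sum k c (fun j => v.toNat / 2 ^ j % 2) (fun j => by show v.toNat / 2 ^ j % 2 ≤ 9; omega) hk

-- the descending loop: with order_of_digit = c - 1 + e it adds (bits read) * 2^e
lemma inner_eq (bf : Int) (d : Nat → Nat) (hd1 : ∀ j, d j ≤ 1) :
    ∀ (c : Nat), (∀ k : Nat, k < c → get_digit bf (k : Int) = (d k : Int)) →
    ∀ (e : Nat) (fin : Int),
    (PySem.List.pyRange (c : Int) 0 (-1)).foldl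
      (fun (q : Int × Int) j =>
        if get_digit bf (j - 1) == 1 then (q.1 - 1, q.2 + 2 ^ q.1.toNat)
        else (q.1 - 1, q.2)) ((c : Int) - 1 + (e : Int), fin)
    = ((e : Int) - 1, fin + ((∑ j ∈ Finset.range c, d j * 2 ^ j) * 2 ^ e : Nat)) := by
  intro c
  induction c with
  | zero =>
    intro _ e fin
    rw [PySem.List.pyRange_neg_one_eq_nil (by omega)]
    simp
    omega
  | succ c ih =>
    intro hd e fin
    rw [Nat.cast_add, Nat.cast_one, PySem.List.pyRange_neg_one_cons (by omega), List.foldl_cons]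
    have harg : ((c:Int) + 1 - 1) = ((c:Nat) : Int) := by ring
    rw [harg, hd c (by omega)]
    have ht : (((c:Int) + (e:Int))).toNat = c + e := by omega
    have hs : ((c:Int) + (e:Int) - 1) = ((c:Int) - 1 + (e:Int)) := by ring
    by_cases h1 : d c = 1
    · rw [h1]
      simp only [Nat.cast_one, beq_self_eq_true, if_true]
      rw [hs, ht, ih (fun k hk => hd k (by omega)) e (fin + 2 ^ (c + e))]
      rw [Finset.sum_range_succ, h1]
      refine Prod.ext rfl ?_
      push_cast [pow_add]
      ring
    · have h0 : d c = 0 := by have := hd1 c; omega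
      rw [h0]
      have hne : ¬ ((((0:Nat):Int)) == 1) = true := by decide
      rw [if_neg hne]
      simp only
      rw [hs, ih (fun k hk => hd k (by omega)) e fin]
      rw [Finset.sum_range_succ, h0]
      simp

-- B's fold started from a is its fold from 0 plus a shifted by all bits consumed
lemma shift_fb (start : Int) (L : List Int) : ∀ (a : Int),
    L.foldl (fun acc i =>
      let v := start + i
      if 0 < v then acc * 2 ^ PySem.Int.bitLength v + v else acc) a
    = a * 2 ^ (bsum start L) +
      L.foldl (fun acc i =>
        let v := start + i
        if 0 < v then acc * 2 ^ PySem.Int.bitLength v + v else acc) 0 := by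
  induction L with
  | nil => intro a; simp [bsum]
  | cons x t ih =>
    intro a
    simp only [List.foldl_cons]
    have hb : bsum start (x :: t) = blen (start + x) + bsum start t := by
      simp [bsum, List.map_cons]
    by_cases h : 0 < start + x
    · simp only [if_pos h]
      rw [ih (a * 2 ^ PySem.Int.bitLength (start + x) + (start + x)),
          ih (0 * 2 ^ PySem.Int.bitLength (start + x) + (start + x)), hb]
      unfold blen
      rw [if_pos h]
      push_cast [pow_add]
      ring
    · simp only [if_neg h]
      rw [ih a, ih 0, hb]
      unfold blen
      rw [if_neg h]
      simp

-- A's outer loop, started with order_of_digit = (total bits) - 1 + e, computes B's fold shifted by e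
lemma outer_eq (start : Int) (L : List Int) :
    ∀ (e : Nat) (fin : Int),
    L.foldl (fun (st : Int × Int) i =>
      let n₀ := start + i
      let count1 := halveCount n₀ 0
      let enc := (PySem.List.pyRange 0 count1 1).foldl
          (fun (p : Int × Int) j =>
            (PySem.Int.floordiv p.1 2, p.2 + PySem.Int.mod p.1 2 * 10 ^ j.toNat)) (n₀, 0)
      (PySem.List.pyRange count1 0 (-1)).foldl
          (fun (q : Int × Int) j =>
            if get_digit enc.2 (j - 1) == 1 then (q.1 - 1, q.2 + 2 ^ q.1.toNat)
            else (q.1 - 1, q.2)) st)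
      ((bsum start L : Int) - 1 + (e : Int), fin)
    = ((e : Int) - 1,
       fin + (L.foldl (fun acc i =>
          let v := start + i
          if 0 < v then acc * 2 ^ PySem.Int.bitLength v + v else acc) 0) * 2 ^ e) := by
  induction L with
  | nil =>
    intro e fin
    simp [bsum]
    omega
  | cons x t ih =>
    intro e fin
    simp only [List.foldl_cons]
    have hcount : halveCount (start + x) 0 = ((blen (start + x) : Nat) : Int) := by
      rw [halveCount_eq]; ring
    have hb : bsum start (x :: t) = blen (start + x) + bsum start t := by
      simp [bsum, List.map_cons]
    by_cases h : 0 < start + x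
    · have hbl : blen (start + x) = PySem.Int.bitLength (start + x) := by
        unfold blen; rw [if_pos h]
      have henc := enc_eq (start + x) (by omega) (blen (start + x))
      have hst : ((bsum start (x :: t) : Int) - 1 + (e : Int))
          = ((blen (start + x) : Int) - 1 + ((bsum start t + e : Nat) : Int)) := by
        rw [hb]; push_cast; ring
      have hsum : (∑ j ∈ Finset.range (blen (start + x)), ((start + x).toNat / 2 ^ j % 2) * 2 ^ j)
          = (start + x).toNat := by
        rw [binval, hbl]
        have hlt : (start + x).natAbs < 2 ^ PySem.Int.bitLength (start + x) :=
          PySem.Int.lt_two_pow_bitLength (start + x)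
        have : (start + x).toNat = (start + x).natAbs := by omega
        rw [this]
        exact Nat.mod_eq_of_lt hlt
      rw [hcount, hst, henc]
      rw [inner_eq ((decVal (start + x) (blen (start + x)) : Nat) : Int)
            (fun j => (start + x).toNat / 2 ^ j % 2)
            (fun j => by show (start + x).toNat / 2 ^ j % 2 ≤ 1; omega)
            (blen (start + x))
            (fun k hk => get_digit_dec (start + x) _ k hk)
            (bsum start t + e) fin]
      rw [hsum]
      have hst2 : (((bsum start t + e : Nat) : Int) - 1)
          = ((bsum start t : Int) - 1 + (e : Int)) := by push_cast; ring
      rw [hst2, ih e _]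
      refine Prod.ext rfl ?_
      simp only
      rw [shift_fb start t (if 0 < start + x then 0 * 2 ^ PySem.Int.bitLength (start + x) + (start + x) else 0)]
      rw [if_pos h]
      have hv : ((start + x).toNat : Int) = start + x := by omega
      push_cast [pow_add]
      rw [hv]
      ring
    · have hbl0 : blen (start + x) = 0 := by unfold blen; rw [if_neg h]
      rw [hcount, hbl0]
      simp only [Nat.cast_zero]
      rw [PySem.List.pyRange_one_eq_nil (by omega), PySem.List.pyRange_neg_one_eq_nil (by omega)]
      simp only [List.foldl_nil]
      rw [hb, hbl0]
      simp only [Nat.zero_add]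
      rw [ih e fin]
      simp only [if_neg h]

-- ===== VERDICT (by name: the statement is the Claim_ definition above) =====
theorem joined_spec : Claim_equal_joined := by
  intro start count _
  unfold Spec_joined joined joined_alt
  dsimp only
  have h0 := get_count_eq start (PySem.List.pyRange 0 count 1) (-1)
  have h := outer_eq start (PySem.List.pyRange 0 count 1) 0 0
  simp only [Nat.cast_zero] at h
  unfold get_count
  rw [h0]
  have : (-1 : Int) + (bsum start (PySem.List.pyRange 0 count 1) : Int)
       = (bsum start (PySem.List.pyRange 0 count 1) : Int) - 1 + (0 : Int) := by ring
  rw [this, h]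
  ring
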